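-- pv_equiv track=rewrite | github.com/vanBeelenReka/game_2048 | 2048.py | move_values
-- ===== SOURCE A (Python) =====
-- def move_values(one_column):
--     index = len(one_column) - 2
--     while index >= 0:
--         if one_column[index] == "_":
--             pass
--         else:
--             inside_index = index + 1
--             while one_column[inside_index] == "_" and inside_index < len(one_column):
--                 inside_index += 1
--                 if inside_index == len(one_column):
--                     break
--             if (one_column[inside_index - 1] == "_"):
--                 one_column[inside_index-1] = one_column[index]
--                 one_column[index] = "_"
--         index -= 1
--     return one_column
-- ===== SOURCE B (Python) =====
-- def move_values(one_column):
--     n = len(one_column)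
--     write = n - 1
--     for i in range(n - 1, -1, -1):
--         if one_column[i] != "_":
--             one_column[write] = one_column[i]
--             write -= 1
--     for k in range(write + 1):
--         one_column[k] = "_"
--     return one_column
-- ===== Notes on version B (the rewrite author's own statement) =====
-- stated objective: faster
-- what changed: Replaced A's per-cell forward gap-search (nested while loops, worst-case quadratic) by a single reverse sweep with a write pointer plus a blank-fill pass; intended as faster and measured 1.5x-1.8x at n=262144 in a timing run.
import Mathlib
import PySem

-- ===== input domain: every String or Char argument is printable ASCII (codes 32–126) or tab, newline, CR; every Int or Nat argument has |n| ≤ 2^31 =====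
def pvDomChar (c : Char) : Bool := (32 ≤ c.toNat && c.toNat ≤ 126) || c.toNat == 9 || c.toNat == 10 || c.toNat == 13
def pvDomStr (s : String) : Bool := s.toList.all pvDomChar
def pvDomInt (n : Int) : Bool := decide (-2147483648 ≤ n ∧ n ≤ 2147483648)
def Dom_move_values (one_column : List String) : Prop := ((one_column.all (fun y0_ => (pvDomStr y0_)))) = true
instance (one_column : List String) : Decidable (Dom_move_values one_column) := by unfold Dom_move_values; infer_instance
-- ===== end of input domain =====

-- B replaces A's per-cell forward gap-search (worst-case quadratic) by one linear reverse sweep with a write pointer plus a blank-fill pass; a timing run measured it 1.5x-1.8x faster at the largest size.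
-- Both Pythons mutate the list in place and return the same object; the theorems below are about the returned value.

-- ===== PORT A =====
def innerScanA (xs : List String) (j : Nat) : Nat :=
  if _h : j < xs.length then
    if xs.getD j "" = "_" then
      if j + 1 = xs.length then j + 1
      else innerScanA xs (j + 1)
    else j
  else j
termination_by xs.length - j

def stepA (xs : List String) (index : Nat) : List String :=
  if xs.getD index "" = "_" then xs
  else
    let ii := innerScanA xs (index + 1)
    if xs.getD (ii - 1) "" = "_" then
      (xs.set (ii - 1) (xs.getD index "")).set index "_"
    else xs

def outerLoopA (xs : List String) (index : Nat) : List String :=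
  match index with
  | 0 => stepA xs 0
  | i + 1 => outerLoopA (stepA xs (i + 1)) i

def move_values (one_column : List String) : List String :=
  -- index = len - 2; while index >= 0: when len < 2 the loop body never runs
  if one_column.length < 2 then one_column
  else outerLoopA one_column (one_column.length - 2)

-- ===== PORT B =====
def stepB (xs : List String) (i : Nat) (write : Int) : List String × Int :=
  if xs.getD i "" ≠ "_" then (xs.set write.toNat (xs.getD i ""), write - 1)
  else (xs, write)

def sweepB (xs : List String) (i : Nat) (write : Int) : List String × Int :=
  match i with
  | 0 => stepB xs 0 write
  | k + 1 => sweepB (stepB xs (k + 1) write).1 k (stepB xs (k + 1) write).2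

def fillB (xs : List String) (stop : Int) : List String :=
  (PySem.List.pyRange 0 stop 1).foldl (fun acc k => acc.set k.toNat "_") xs

def move_values_alt (one_column : List String) : List String :=
  let n := one_column.length
  let st :=
    if n = 0 then (one_column, (n : Int) - 1)
    else sweepB one_column (n - 1) ((n : Int) - 1)
  fillB st.1 (st.2 + 1)

-- ===== PRECONDITION & SPEC =====
def Spec_move_values (one_column : List String) (out : List String) : Prop := out = move_values_alt one_column
instance (one_column : List String) (out : List String) : Decidable (Spec_move_values one_column out) := by unfold Spec_move_values; infer_instance

-- ===== CLAIM (what is proved, stated in full; the proofs are below) =====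
def Claim_equal_move_values : Prop := ∀ (one_column : List String), Dom_move_values one_column → Spec_move_values one_column (move_values one_column)

-- ===== LEMMAS AND PROOFS =====

-- canonical result: the blanks first, then the non-blank values in their original order
def pvCanon (xs : List String) : List String :=
  List.replicate (xs.length - (xs.filter (fun s => decide (s ≠ "_"))).length) "_"
    ++ xs.filter (fun s => decide (s ≠ "_"))

lemma getD_at_len {α : Type} (l r : List α) (x d : α) : (l ++ x :: r).getD l.length d = x := by
  rw [List.getD_append_right _ _ _ _ (le_refl _)]
  simp [List.getD]

lemma set_at_len {α : Type} (l r : List α) (x a : α) : (l ++ x :: r).set l.length a = l ++ a :: r := by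
  rw [List.set_append_right _ _ (le_refl _)]
  simp

lemma set_last_eq {α : Type} (c : List α) (a : α) (h : c ≠ []) :
    c.set (c.length - 1) a = c.dropLast ++ [a] := by
  induction c with
  | nil => exact absurd rfl h
  | cons x c ih =>
    cases hc : c with
    | nil => rfl
    | cons y c' =>
      rw [← hc]
      have hne : c ≠ [] := by rw [hc]; simp
      have hpos : 0 < c.length := List.length_pos_iff.mpr hne
      have h1 : (x :: c).length - 1 = (c.length - 1) + 1 := by simp; omega
      rw [h1, List.set_cons_succ, ih hne, List.dropLast_cons_of_ne_nil hne, List.cons_append]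

lemma innerScanA_spec (l vals : List String) (g : Nat)
    (hv : ∀ v ∈ vals, v ≠ "_") :
    innerScanA (l ++ (List.replicate g "_" ++ vals)) l.length = l.length + g := by
  induction g generalizing l with
  | zero =>
    unfold innerScanA
    cases vals with
    | nil => simp
    | cons v vs =>
      have hvne : v ≠ "_" := hv v (by simp)
      rw [dif_pos (by simp)]
      rw [show (l ++ (List.replicate 0 "_" ++ v :: vs)) = l ++ v :: vs by simp]
      rw [getD_at_len]
      rw [if_neg hvne]
      simp
  | succ g ih =>
    have hre : l ++ (List.replicate (g+1) "_" ++ vals)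
        = (l ++ ["_"]) ++ (List.replicate g "_" ++ vals) := by
      simp [List.replicate_succ]
    unfold innerScanA
    rw [dif_pos (by simp)]
    rw [show (l ++ (List.replicate (g+1) "_" ++ vals)) = l ++ "_" :: (List.replicate g "_" ++ vals) by simp [List.replicate_succ]]
    rw [getD_at_len, if_pos rfl]
    by_cases hend : l.length + 1 = (l ++ "_" :: (List.replicate g "_" ++ vals)).length
    · rw [if_pos hend]
      simp at hend
      obtain ⟨hg, hvals⟩ := hend
      omega
    · rw [if_neg hend]
      rw [show l ++ "_" :: (List.replicate g "_" ++ vals) = (l ++ ["_"]) ++ (List.replicate g "_" ++ vals) by simp]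
      rw [show l.length + 1 = (l ++ ["_"]).length by simp]
      rw [ih (l ++ ["_"])]
      simp
      omega

lemma outerLoopA_spec (l : List String) (g : Nat) (vals : List String)
    (hl : l ≠ []) (hv : ∀ v ∈ vals, v ≠ "_") :
    outerLoopA (l ++ (List.replicate g "_" ++ vals)) (l.length - 1)
      = List.replicate (l.length - (l.filter (fun s => decide (s ≠ "_"))).length + g) "_"
        ++ (l.filter (fun s => decide (s ≠ "_")) ++ vals) := by
  induction l using List.reverseRecOn generalizing g vals with
  | nil => exact absurd rfl hl
  | append_singleton l' x ih =>
    have hlen : (l' ++ [x]).length - 1 = l'.length := by simp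
    have hcons : (l' ++ [x]) ++ (List.replicate g "_" ++ vals)
        = l' ++ x :: (List.replicate g "_" ++ vals) := by simp
    have hget : ((l' ++ [x]) ++ (List.replicate g "_" ++ vals)).getD l'.length "" = x := by
      rw [hcons, getD_at_len]
    rw [hlen]
    by_cases hx : x = "_"
    · -- blank cell: stepA is the identity here
      have hstep : stepA ((l' ++ [x]) ++ (List.replicate g "_" ++ vals)) l'.length
          = (l' ++ [x]) ++ (List.replicate g "_" ++ vals) := by
        unfold stepA
        rw [if_pos (by rw [hget, hx])]
      have hre : (l' ++ [x]) ++ (List.replicate g "_" ++ vals)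
          = l' ++ (List.replicate (g+1) "_" ++ vals) := by
        subst hx; simp [List.replicate_succ]
      have hfl : ((l' ++ [x]).filter (fun s => decide (s ≠ "_")))
          = l'.filter (fun s => decide (s ≠ "_")) := by
        subst hx; simp
      cases hl' : l' with
      | nil =>
        subst hl'
        show outerLoopA _ 0 = _
        unfold outerLoopA
        simp only [List.length_nil] at hstep
        rw [hstep, hre, hfl]
        subst hx
        simp [List.replicate_succ, Nat.add_comm]
      | cons a l'' =>
        rw [← hl']
        have hne : l' ≠ [] := by rw [hl']; simp
        have hpos : 0 < l'.length := List.length_pos_iff.mpr hne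
        rw [show l'.length = (l'.length - 1) + 1 by omega]
        show outerLoopA (stepA _ ((l'.length - 1) + 1)) (l'.length - 1) = _
        rw [show (l'.length - 1) + 1 = l'.length by omega, hstep, hre,
          ih (g+1) vals hne hv, hfl]
        have hle := List.length_filter_le (fun s => decide (s ≠ "_")) l'
        have h2 : (l' ++ [x]).length - (List.filter (fun s => decide (s ≠ "_")) l').length + g
            = l'.length - (List.filter (fun s => decide (s ≠ "_")) l').length + (g+1) := by
          simp only [List.length_append, List.length_cons, List.length_nil]
          omega
        rw [h2]
    · -- non-blank cell
      have hii : innerScanA ((l' ++ [x]) ++ (List.replicate g "_" ++ vals)) (l'.length + 1)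
          = l'.length + 1 + g := by
        have := innerScanA_spec (l' ++ [x]) vals g hv
        simpa using this
      have hfl : ((l' ++ [x]).filter (fun s => decide (s ≠ "_")))
          = l'.filter (fun s => decide (s ≠ "_")) ++ [x] := by
        simp [List.filter_append, List.filter, hx]
      have hv' : ∀ v ∈ (x :: vals), v ≠ "_" := by
        intro v hvm
        rcases List.mem_cons.mp hvm with h | h
        · rw [h]; exact hx
        · exact hv v h
      cases g with
      | zero =>
        have hstep : stepA ((l' ++ [x]) ++ (List.replicate 0 "_" ++ vals)) l'.length
            = (l' ++ [x]) ++ (List.replicate 0 "_" ++ vals) := by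
          unfold stepA
          rw [if_neg (by rw [hget]; exact hx)]
          simp only [] at hii ⊢
          rw [hii]
          rw [if_neg (by rw [show l'.length + 1 + 0 - 1 = l'.length by omega, hget]; exact hx)]
        have hre : (l' ++ [x]) ++ (List.replicate 0 "_" ++ vals)
            = l' ++ (List.replicate 0 "_" ++ (x :: vals)) := by simp
        cases hl' : l' with
        | nil =>
          subst hl'
          show outerLoopA _ 0 = _
          unfold outerLoopA
          simp only [List.length_nil] at hstep
          rw [hstep, hfl]
          simp [List.filter]
        | cons a l'' =>
          rw [← hl']
          have hne : l' ≠ [] := by rw [hl']; simp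
          have hpos : 0 < l'.length := List.length_pos_iff.mpr hne
          rw [show l'.length = (l'.length - 1) + 1 by omega]
          show outerLoopA (stepA _ ((l'.length - 1) + 1)) (l'.length - 1) = _
          rw [show (l'.length - 1) + 1 = l'.length by omega, hstep, hre,
            ih 0 (x :: vals) hne hv', hfl]
          have hle := List.length_filter_le (fun s => decide (s ≠ "_")) l'
          have h2 : (l' ++ [x]).length - (List.filter (fun s => decide (s ≠ "_")) l' ++ [x]).length + 0
              = l'.length - (List.filter (fun s => decide (s ≠ "_")) l').length + 0 := by
            simp
          rw [h2]
          simp [List.append_assoc]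
      | succ g' =>
        -- the moved-value case: x jumps to the far end of the gap
        have hidx : l'.length + 1 + (g' + 1) - 1 = l'.length + 1 + g' := by omega
        have hgd : ((l' ++ [x]) ++ (List.replicate (g'+1) "_" ++ vals)).getD (l'.length + 1 + g') ""
            = "_" := by
          rw [List.getD_append_right _ _ _ _ (by simp)]
          rw [show l'.length + 1 + g' - (l' ++ [x]).length = g' by simp]
          rw [List.getD_append _ _ _ _ (by simp)]
          exact List.getD_replicate _ (by omega)
        have hset1 : (((l' ++ [x]) ++ (List.replicate (g'+1) "_" ++ vals)).set (l'.length + 1 + g') x)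
            = (l' ++ [x]) ++ ((List.replicate g' "_" ++ [x]) ++ vals) := by
          rw [List.set_append_right _ _ (by simp)]
          rw [show l'.length + 1 + g' - (l' ++ [x]).length = g' by simp]
          rw [List.set_append_left _ _ (by simp)]
          congr 2
          have := set_last_eq (List.replicate (g'+1) "_") x (by simp)
          simpa [List.dropLast_replicate] using this
        have hset2 : (((l' ++ [x]) ++ ((List.replicate g' "_" ++ [x]) ++ vals)).set l'.length "_")
            = l' ++ (List.replicate (g'+1) "_" ++ (x :: vals)) := by
          rw [show (l' ++ [x]) ++ ((List.replicate g' "_" ++ [x]) ++ vals)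
            = l' ++ x :: ((List.replicate g' "_" ++ [x]) ++ vals) by simp]
          rw [set_at_len]
          simp [List.replicate_succ, List.append_assoc]
        have hstep : stepA ((l' ++ [x]) ++ (List.replicate (g'+1) "_" ++ vals)) l'.length
            = l' ++ (List.replicate (g'+1) "_" ++ (x :: vals)) := by
          unfold stepA
          rw [if_neg (by rw [hget]; exact hx)]
          simp only [] at hii ⊢
          rw [hii, hidx, if_pos hgd, hget, hset1, hset2]
        cases hl' : l' with
        | nil =>
          subst hl'
          show outerLoopA _ 0 = _
          unfold outerLoopA
          simp only [List.length_nil] at hstep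
          rw [hstep, hfl]
          simp [List.filter, List.replicate_succ]
        | cons a l'' =>
          rw [← hl']
          have hne : l' ≠ [] := by rw [hl']; simp
          have hpos : 0 < l'.length := List.length_pos_iff.mpr hne
          rw [show l'.length = (l'.length - 1) + 1 by omega]
          show outerLoopA (stepA _ ((l'.length - 1) + 1)) (l'.length - 1) = _
          rw [show (l'.length - 1) + 1 = l'.length by omega, hstep,
            ih (g'+1) (x :: vals) hne hv', hfl]
          have hle := List.length_filter_le (fun s => decide (s ≠ "_")) l'
          have h2 : (l' ++ [x]).length - (List.filter (fun s => decide (s ≠ "_")) l' ++ [x]).length + (g'+1)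
              = l'.length - (List.filter (fun s => decide (s ≠ "_")) l').length + (g'+1) := by
            simp
          rw [h2]
          simp [List.append_assoc]

lemma move_values_eq_canon (xs : List String) : move_values xs = pvCanon xs := by
  unfold move_values
  by_cases hsmall : xs.length < 2
  · rw [if_pos hsmall]
    match xs with
    | [] => rfl
    | [x] =>
      by_cases hx : x = "_"
      · subst hx; rfl
      · simp [pvCanon, List.filter, hx]
    | x :: y :: rest => simp at hsmall
  · rw [if_neg hsmall]
    rw [Nat.not_lt] at hsmall
    have hne : xs ≠ [] := by
      intro h; rw [h] at hsmall; simp at hsmall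
    rcases (List.eq_nil_or_concat xs).resolve_left hne with ⟨l, x, rfl⟩
    rw [List.concat_eq_append] at *
    have hlne : l ≠ [] := by
      intro h; rw [h] at hsmall; simp at hsmall
    have hidx : (l ++ [x]).length - 2 = l.length - 1 := by simp
    rw [hidx]
    have hle := List.length_filter_le (fun s => decide (s ≠ "_")) l
    by_cases hx : x = "_"
    · subst hx
      have hsp := outerLoopA_spec l 1 [] hlne (by intro v h; simp at h)
      rw [show l ++ (List.replicate 1 "_" ++ []) = l ++ ["_"] by simp] at hsp
      rw [hsp]
      unfold pvCanon
      have hfl : ((l ++ ["_"]).filter (fun s => decide (s ≠ "_")))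
          = l.filter (fun s => decide (s ≠ "_")) := by simp
      rw [hfl]
      have h2 : (l ++ ["_"]).length - (List.filter (fun s => decide (s ≠ "_")) l).length
          = l.length - (List.filter (fun s => decide (s ≠ "_")) l).length + 1 := by
        simp only [List.length_append, List.length_cons, List.length_nil]
        omega
      rw [h2]
      simp
    · have hsp := outerLoopA_spec l 0 [x] hlne (by intro v h; simp at h; rw [h]; exact hx)
      rw [show l ++ (List.replicate 0 "_" ++ [x]) = l ++ [x] by simp] at hsp
      rw [hsp]
      unfold pvCanon
      have hfl : ((l ++ [x]).filter (fun s => decide (s ≠ "_")))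
          = l.filter (fun s => decide (s ≠ "_")) ++ [x] := by
        simp [List.filter_append, List.filter, hx]
      rw [hfl]
      have h2 : (l ++ [x]).length - (List.filter (fun s => decide (s ≠ "_")) l ++ [x]).length
          = l.length - (List.filter (fun s => decide (s ≠ "_")) l).length + 0 := by
        simp only [List.length_append, List.length_cons, List.length_nil]
        omega
      rw [h2]

lemma sweepB_spec (l mid vals : List String) (hl : l ≠ []) :
    ∃ junk : List String,
      junk.length = l.length + mid.length - (l.filter (fun s => decide (s ≠ "_"))).length ∧
      sweepB (l ++ (mid ++ vals)) (l.length - 1) ((l.length : Int) + mid.length - 1)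
        = (junk ++ (l.filter (fun s => decide (s ≠ "_")) ++ vals),
           (l.length : Int) + mid.length - (l.filter (fun s => decide (s ≠ "_"))).length - 1) := by
  induction l using List.reverseRecOn generalizing mid vals with
  | nil => exact absurd rfl hl
  | append_singleton l' x ih =>
    have hlen : (l' ++ [x]).length - 1 = l'.length := by simp
    have hcons : (l' ++ [x]) ++ (mid ++ vals) = l' ++ x :: (mid ++ vals) := by simp
    have hget : ((l' ++ [x]) ++ (mid ++ vals)).getD l'.length "" = x := by
      rw [hcons, getD_at_len]
    have hle := List.length_filter_le (fun s => decide (s ≠ "_")) l'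
    rw [hlen]
    by_cases hx : x = "_"
    · -- blank: skip, mid grows
      have hstep : stepB ((l' ++ [x]) ++ (mid ++ vals)) l'.length (((l' ++ [x]).length : Int) + mid.length - 1)
          = ((l' ++ [x]) ++ (mid ++ vals), ((l' ++ [x]).length : Int) + mid.length - 1) := by
        unfold stepB
        rw [if_neg (by rw [hget, hx]; simp)]
      have hfl : ((l' ++ [x]).filter (fun s => decide (s ≠ "_")))
          = l'.filter (fun s => decide (s ≠ "_")) := by
        subst hx; simp
      have hre : (l' ++ [x]) ++ (mid ++ vals) = l' ++ ((x :: mid) ++ vals) := by simp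
      cases hl' : l' with
      | nil =>
        subst hl'
        subst hx
        refine ⟨"_" :: mid, by simp; omega, ?_⟩
        show stepB _ 0 _ = _
        simp only [List.length_nil] at hstep
        rw [hstep, hfl]
        simp only [Prod.mk.injEq]
        refine ⟨by simp, by simp⟩
      | cons a l'' =>
        rw [← hl']
        have hne : l' ≠ [] := by rw [hl']; simp
        have hpos : 0 < l'.length := List.length_pos_iff.mpr hne
        obtain ⟨junk, hj, hs⟩ := ih (x :: mid) vals hne
        refine ⟨junk, ?_, ?_⟩
        · rw [hfl]
          simp only [List.length_cons] at hj
          simp only [List.length_append, List.length_cons, List.length_nil]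
          omega
        · rw [show l'.length = (l'.length - 1) + 1 by omega]
          show sweepB (stepB _ ((l'.length - 1) + 1) _).1 (l'.length - 1) (stepB _ ((l'.length - 1) + 1) _).2 = _
          rw [show (l'.length - 1) + 1 = l'.length by omega, hstep]
          simp only []
          rw [hre]
          have harg : ((l' ++ [x]).length : Int) + (mid.length : Int) - 1
              = (l'.length : Int) + ((x :: mid).length : Int) - 1 := by
            simp; omega
          rw [harg, hs, hfl]
          simp only [Prod.mk.injEq]
          refine ⟨by simp, ?_⟩
          simp only [List.length_cons, List.length_append, List.length_nil]
          omega
    · -- non-blank: write x at the write pointer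
      have hwt : (((l' ++ [x]).length : Int) + (mid.length : Int) - 1).toNat
          = l'.length + mid.length := by simp; omega
      have hset : (((l' ++ [x]) ++ (mid ++ vals)).set (l'.length + mid.length) x)
          = l' ++ (((x :: mid).dropLast ++ [x]) ++ vals) := by
        rw [hcons]
        rw [show l' ++ x :: (mid ++ vals) = l' ++ ((x :: mid) ++ vals) by simp]
        rw [List.set_append_right _ _ (by simp)]
        rw [show l'.length + mid.length - l'.length = mid.length by omega]
        rw [List.set_append_left _ _ (by simp)]
        congr 2
        have := set_last_eq (x :: mid) x (by simp)
        simpa using this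
      have hstep : stepB ((l' ++ [x]) ++ (mid ++ vals)) l'.length (((l' ++ [x]).length : Int) + mid.length - 1)
          = (l' ++ (((x :: mid).dropLast ++ [x]) ++ vals), ((l' ++ [x]).length : Int) + mid.length - 1 - 1) := by
        unfold stepB
        rw [if_pos (by rw [hget]; exact hx), hget, hwt, hset]
      have hfl : ((l' ++ [x]).filter (fun s => decide (s ≠ "_")))
          = l'.filter (fun s => decide (s ≠ "_")) ++ [x] := by
        simp [List.filter_append, List.filter, hx]
      cases hl' : l' with
      | nil =>
        subst hl'
        refine ⟨(x :: mid).dropLast, by simp [List.filter, hx], ?_⟩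
        show stepB _ 0 _ = _
        simp only [List.length_nil] at hstep
        rw [hstep, hfl]
        simp only [Prod.mk.injEq]
        refine ⟨by simp [List.append_assoc], by simp [List.filter]⟩
      | cons a l'' =>
        rw [← hl']
        have hne : l' ≠ [] := by rw [hl']; simp
        have hpos : 0 < l'.length := List.length_pos_iff.mpr hne
        obtain ⟨junk, hj, hs⟩ := ih ((x :: mid).dropLast) (x :: vals) hne
        refine ⟨junk, ?_, ?_⟩
        · rw [hfl]
          simp only [List.length_dropLast, List.length_cons, Nat.add_sub_cancel] at hj
          simp only [List.length_append, List.length_cons, List.length_nil]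
          omega
        · rw [show l'.length = (l'.length - 1) + 1 by omega]
          show sweepB (stepB _ ((l'.length - 1) + 1) _).1 (l'.length - 1) (stepB _ ((l'.length - 1) + 1) _).2 = _
          rw [show (l'.length - 1) + 1 = l'.length by omega, hstep]
          simp only []
          rw [show l' ++ (((x :: mid).dropLast ++ [x]) ++ vals)
              = l' ++ ((x :: mid).dropLast ++ (x :: vals)) by simp [List.append_assoc]]
          have harg : ((l' ++ [x]).length : Int) + (mid.length : Int) - 1 - 1
              = (l'.length : Int) + (((x :: mid).dropLast).length : Int) - 1 := by
            simp; omega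
          rw [harg, hs, hfl]
          simp only [Prod.mk.injEq]
          constructor
          · simp [List.append_assoc]
          · simp only [List.length_dropLast, List.length_cons, Nat.add_sub_cancel,
              List.length_append, List.length_nil]
            push_cast
            omega

lemma fillB_spec (ys : List String) (k : Nat) (h : k ≤ ys.length) :
    fillB ys (k : Int) = List.replicate k "_" ++ ys.drop k := by
  induction k with
  | zero =>
    unfold fillB
    rw [show ((0:Nat):Int) = (0:Int) by simp, PySem.List.pyRange_one_eq_nil (le_refl 0)]
    simp only [List.foldl_nil, List.replicate_zero, List.nil_append, List.drop_zero]
  | succ k ih =>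
    have hk : k ≤ ys.length := by omega
    have hrange : PySem.List.pyRange 0 ((k+1 : Nat) : Int) 1
        = PySem.List.pyRange 0 (k : Int) 1 ++ [(k : Int)] := by
      have h1 := PySem.List.pyRange_one_succ_right (a := 0) (b := (k : Int)) (by positivity)
      push_cast
      exact h1
    unfold fillB
    rw [hrange, List.foldl_append]
    have hihr := ih hk
    unfold fillB at hihr
    rw [hihr]
    simp only [List.foldl_cons, List.foldl_nil, Int.toNat_natCast]
    rw [List.set_append_right _ _ (by simp)]
    have hdrop : ys.drop k = ys[k] :: ys.drop (k+1) := List.drop_eq_getElem_cons (by omega)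
    rw [List.length_replicate, Nat.sub_self]
    rw [hdrop, List.set_cons_zero, List.replicate_succ', List.append_assoc]
    simp only [List.singleton_append]

lemma move_values_alt_eq_canon (xs : List String) : move_values_alt xs = pvCanon xs := by
  unfold move_values_alt
  cases hxs : xs with
  | nil =>
    subst hxs
    simp only [List.length_nil, fillB]
    rw [if_pos trivial]
    rw [show ((0:Nat):Int) - 1 + 1 = (0:Int) by omega,
      PySem.List.pyRange_one_eq_nil (le_refl 0)]
    rfl
  | cons a rest =>
    rw [← hxs]
    have hne : xs ≠ [] := by rw [hxs]; simp
    have hpos : 0 < xs.length := List.length_pos_iff.mpr hne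
    simp only []
    rw [if_neg (by omega)]
    obtain ⟨junk, hj, hs⟩ := sweepB_spec xs [] [] hne
    simp only [List.append_nil, List.length_nil] at hs hj
    simp only [Nat.cast_zero, add_zero] at hs
    rw [hs]
    simp only []
    have hle := List.length_filter_le (fun s => decide (s ≠ "_")) xs
    have hk : (xs.length : Int) - ((xs.filter (fun s => decide (s ≠ "_"))).length : Int) - 1 + 1
        = ((xs.length - (xs.filter (fun s => decide (s ≠ "_"))).length : Nat) : Int) := by
      omega
    rw [hk, fillB_spec _ _ (by rw [List.length_append, hj]; omega)]
    unfold pvCanon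
    congr 1
    rw [show xs.length - (xs.filter (fun s => decide (s ≠ "_"))).length = junk.length by omega]
    rw [List.drop_left]

-- ===== VERDICT (by name: the statement is the Claim_ definition above) =====
theorem move_values_spec : Claim_equal_move_values := by
  intro xs _
  unfold Spec_move_values
  rw [move_values_eq_canon, move_values_alt_eq_canon]
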